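-- pv_equiv track=rewrite | github.com/voussoir/reddit | Prawtimestamps/hangman.py | listblock
-- ===== SOURCE A (Python) =====
-- def listblock(x, blocklength=12, joins=', '):
--     out = ''
--     x = ['[`{i}`](http://redd.it/{i})'.format(i=i) for i in x]
--     l = len(x)
--     ra = (l // blocklength)
--     if l % blocklength is not 0:
--         ra += 1
--     for i in range(ra):
--         a = i*blocklength
--         b = a + blocklength
--         out += joins.join(x[a:b])
--         out += '  \n'
--     return out
-- ===== SOURCE B (Python) =====
-- def listblock(x, blocklength=12, joins=', '):
--     parts = []
--     current = []
--     for i in x: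
--         current.append('[`{i}`](http://redd.it/{i})'.format(i=i))
--         if len(current) == blocklength:
--             parts.append(joins.join(current) + '  \n')
--             current = []
--     if current:
--         parts.append(joins.join(current) + '  \n')
--     return ''.join(parts)
-- ===== Notes on version B (the rewrite author's own statement) =====
-- stated objective: alternative
-- what changed: Replaces the block-count division plus per-block slicing with a single streaming pass that fills a buffer and flushes a joined block every blocklength elements.
-- intended difference: For negative blocklength with a non-empty list, A returns '' (range over a non-positive block count silently drops every element) while B returns all elements as one block; keeping the data is the intended behaviour. — e.g. on listblock(["a"], -1, ", "): A returns "", B returns "[`a`](http://redd.it/a) \n"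
import Mathlib
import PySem

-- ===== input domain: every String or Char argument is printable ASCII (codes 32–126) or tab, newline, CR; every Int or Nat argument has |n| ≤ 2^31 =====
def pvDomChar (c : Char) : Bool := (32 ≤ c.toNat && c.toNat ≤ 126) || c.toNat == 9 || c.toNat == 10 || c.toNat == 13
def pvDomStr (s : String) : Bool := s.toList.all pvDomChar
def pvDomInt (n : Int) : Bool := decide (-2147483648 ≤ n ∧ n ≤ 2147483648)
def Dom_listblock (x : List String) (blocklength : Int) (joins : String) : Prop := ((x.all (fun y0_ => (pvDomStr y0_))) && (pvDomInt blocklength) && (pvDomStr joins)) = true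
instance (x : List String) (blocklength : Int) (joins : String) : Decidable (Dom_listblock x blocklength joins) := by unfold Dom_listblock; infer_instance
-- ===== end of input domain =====

-- B streams over the list with a buffer flushed every blocklength elements instead of counting blocks by division and slicing; equivalence proved for blocklength ≠ 0 outside D_ (negative blocklength, where B keeps the data in one block).


-- ===== PORT A =====
-- '[`{i}`](http://redd.it/{i})'.format(i=i), on char lists
def pvFmt (i : List Char) : List Char :=
  "[`".toList ++ i ++ "`](http://redd.it/".toList ++ i ++ ")".toList

-- the body of A after the list comprehension: len, //, % (floor, Python-exact), range loop with slices
-- ('l % blocklength is not 0' is '≠ 0': CPython interns the int 0, so 'is not 0' is value inequality there)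
def listblockGo (y : List (List Char)) (blocklength : Int) (joins : List Char) : List Char :=
  let l : Int := y.length
  let ra := PySem.Int.floordiv l blocklength
  let ra := if PySem.Int.mod l blocklength ≠ 0 then ra + 1 else ra
  (PySem.List.pyRange 0 ra 1).foldl
    (fun out i =>
      let a := i * blocklength
      let b := a + blocklength
      (out ++ PySem.Chars.join joins (PySem.List.slice y (some a) (some b))) ++ "  \n".toList)
    []

def listblock (x : List String) (blocklength : Int) (joins : String) : String :=
  String.ofList (listblockGo (x.map (fun i => pvFmt i.toList)) blocklength joins.toList)

-- ===== PORT B =====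
def pvFmtAlt (i : List Char) : List Char :=
  "[`".toList ++ i ++ "`](http://redd.it/".toList ++ i ++ ")".toList

-- loop body of B: append the formatted element to 'current', flush when it reaches blocklength
def pvStep (blocklength : Int) (joins : List Char)
    (st : List (List Char) × List (List Char)) (i : String) : List (List Char) × List (List Char) :=
  let current := st.2 ++ [pvFmtAlt i.toList]
  if (current.length : Int) = blocklength then
    (st.1 ++ [PySem.Chars.join joins current ++ "  \n".toList], [])
  else (st.1, current)

-- after the loop: flush a non-empty remainder
def pvFlush (joins : List Char) (st : List (List Char) × List (List Char)) : List (List Char) :=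
  if st.2 ≠ [] then st.1 ++ [PySem.Chars.join joins st.2 ++ "  \n".toList] else st.1

def listblock_alt (x : List String) (blocklength : Int) (joins : String) : String :=
  String.ofList (PySem.Chars.join []
    (pvFlush joins.toList (x.foldl (pvStep blocklength joins.toList) ([], []))))

-- ===== PRECONDITION & SPEC =====
-- Pre_ excludes exactly blocklength = 0, where A raises ZeroDivisionError on 'l // blocklength'.
def Pre_listblock (x : List String) (blocklength : Int) (joins : String) : Prop := blocklength ≠ 0
instance (x : List String) (blocklength : Int) (joins : String) : Decidable (Pre_listblock x blocklength joins) := by unfold Pre_listblock; infer_instance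
def pvWitness_listblock : List String × Int × String := (["a", "b", "c"], 2, ", ")

-- For negative blocklength with a non-empty list, A returns '' (range over a non-positive block count silently drops every element) while B returns all elements as one block; keeping the data is the intended behaviour.
def D_listblock (x : List String) (blocklength : Int) (joins : String) : Prop := blocklength < 0 ∧ x ≠ []
instance (x : List String) (blocklength : Int) (joins : String) : Decidable (D_listblock x blocklength joins) := by unfold D_listblock; infer_instance

def Spec_listblock (x : List String) (blocklength : Int) (joins : String) (out : String) : Prop := ¬ D_listblock x blocklength joins → out = listblock_alt x blocklength joins
instance (x : List String) (blocklength : Int) (joins : String) (out : String) : Decidable (Spec_listblock x blocklength joins out) := by unfold Spec_listblock; infer_instance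

def pvDiffWitness_listblock : List String × Int × String := (["a"], -1, ", ")
def pvDiffWitnessOut_listblock : String × String := ("", "[`a`](http://redd.it/a)  \n")

-- ===== CLAIM (what is proved, stated in full; the proofs are below) =====
def Claim_unchanged_listblock : Prop := ∀ (x : List String) (blocklength : Int) (joins : String), Dom_listblock x blocklength joins → Pre_listblock x blocklength joins → Spec_listblock x blocklength joins (listblock x blocklength joins)
def Claim_changed_listblock : Prop := Dom_listblock (pvDiffWitness_listblock.1) (pvDiffWitness_listblock.2.1) (pvDiffWitness_listblock.2.2) ∧ Pre_listblock (pvDiffWitness_listblock.1) (pvDiffWitness_listblock.2.1) (pvDiffWitness_listblock.2.2) ∧ D_listblock (pvDiffWitness_listblock.1) (pvDiffWitness_listblock.2.1) (pvDiffWitness_listblock.2.2) ∧ listblock (pvDiffWitness_listblock.1) (pvDiffWitness_listblock.2.1) (pvDiffWitness_listblock.2.2) = pvDiffWitnessOut_listblock.1 ∧ listblock_alt (pvDiffWitness_listblock.1) (pvDiffWitness_listblock.2.1) (pvDiffWitness_listblock.2.2) = pvDiffWitnessOut_listblock.2 ∧ pvDiffWitnessOut_listblock.1 ≠ pvDiff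WitnessOut_listblock.2
def Claim_exact_listblock : Prop := ∀ (x : List String) (blocklength : Int) (joins : String), Dom_listblock x blocklength joins → Pre_listblock x blocklength joins → D_listblock x blocklength joins → listblock x blocklength joins ≠ listblock_alt x blocklength joins

-- ===== LEMMAS AND PROOFS =====

lemma pv_join_nil_eq_flatten (l : List (List Char)) : PySem.Chars.join [] l = l.flatten := by
  induction l with
  | nil => simp [PySem.Chars.join_nil]
  | cons p rest ih =>
      cases rest with
      | nil => simp [PySem.Chars.join_singleton]
      | cons q r => simp [PySem.Chars.join_cons_cons, ih]

-- A's ra as a function of the length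
def pvRa (l : Nat) (bl : Int) : Int :=
  let f := PySem.Int.floordiv (l : Int) bl
  if PySem.Int.mod (l : Int) bl ≠ 0 then f + 1 else f

lemma listblockGo_eq_flatMap (y : List (List Char)) (bl : Int) (joins : List Char) :
    listblockGo y bl joins =
      (PySem.List.pyRange 0 (pvRa y.length bl) 1).flatMap
        (fun i => PySem.Chars.join joins (PySem.List.slice y (some (i * bl)) (some (i * bl + bl))) ++ "  \n".toList) := by
  unfold listblockGo pvRa
  rw [show (fun (out : List Char) (i : Int) =>
      (out ++ PySem.Chars.join joins (PySem.List.slice y (some (i * bl)) (some (i * bl + bl)))) ++ "  \n".toList)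
    = (fun out i => out ++ (PySem.Chars.join joins (PySem.List.slice y (some (i * bl)) (some (i * bl + bl))) ++ "  \n".toList))
    from funext fun o => funext fun i => by simp]
  rw [PySem.List.foldl_append_eq_flatMap]
  simp

lemma pvRa_succ (B l : Nat) (hB : 1 ≤ B) (hl : 1 ≤ l) :
    pvRa l (B : Int) = pvRa (l - B) (B : Int) + 1 := by
  unfold pvRa
  simp only [PySem.Int.floordiv_natCast, PySem.Int.mod_natCast]
  rcases Nat.lt_or_ge B l with h | h
  · have hrep : l = (l - B) + B := by omega
    rw [hrep]
    have hd := Nat.add_div_right (l - B) (by omega : 0 < B)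
    have hm := Nat.add_mod_right (l - B) B
    rw [hd, hm, Nat.add_sub_cancel]
    split <;> push_cast <;> ring
  · have h1 : l - B = 0 := by omega
    rcases Nat.eq_or_lt_of_le h with rfl | hlt
    · have : l % l = 0 := Nat.mod_self l
      simp [this, Nat.div_self (by omega : 0 < l), Nat.zero_mod, Nat.zero_div]
    · have hd : l / B = 0 := Nat.div_eq_of_lt hlt
      have hm : l % B = l := Nat.mod_eq_of_lt hlt
      simp [h1, hd, hm, Nat.zero_mod, Nat.zero_div]
      omega

lemma pvRa_nonneg (l : Nat) (B : Nat) : 0 ≤ pvRa l (B : Int) := by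
  unfold pvRa
  simp only [PySem.Int.floordiv_natCast, PySem.Int.mod_natCast]
  split <;> positivity

def pvChunks (bl : Nat) (joins : List Char) : List (List Char) → List (List Char)
  | [] => []
  | h :: t =>
      (PySem.Chars.join joins ((h :: t).take (bl + 1)) ++ "  \n".toList)
        :: pvChunks bl joins ((h :: t).drop (bl + 1))
  termination_by y => y.length
  decreasing_by simp

lemma pvChunks_cons (bl : Nat) (joins : List Char) (y : List (List Char)) (h : y ≠ []) :
    pvChunks bl joins y =
      (PySem.Chars.join joins (y.take (bl + 1)) ++ "  \n".toList)
        :: pvChunks bl joins (y.drop (bl + 1)) := by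
  cases y with
  | nil => exact absurd rfl h
  | cons a t => simp [pvChunks]

lemma Aside (B : Nat) (hB1 : 1 ≤ B) (joins : List Char) (y : List (List Char)) :
    listblockGo y (B : Int) joins = (pvChunks (B - 1) joins y).flatten := by
  induction y using pvChunks.induct (bl := B - 1) with
  | case1 =>
      rw [listblockGo_eq_flatMap]
      simp [pvRa, PySem.Int.floordiv, PySem.Int.mod, Int.zero_fdiv, Int.zero_fmod,
        PySem.List.pyRange_one_eq_nil (le_refl (0:Int)), pvChunks]
  | case2 h t ih =>
      have hBs : B - 1 + 1 = B := by omega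
      rw [hBs] at ih
      have hra : pvRa (h :: t).length (B : Int) = pvRa ((h :: t).length - B) (B : Int) + 1 :=
        pvRa_succ B _ hB1 (by simp)
      have hpos : 0 < pvRa (h :: t).length (B : Int) := by
        have := pvRa_nonneg ((h :: t).length - B) B
        omega
      rw [listblockGo_eq_flatMap, PySem.List.pyRange_one_cons hpos, List.flatMap_cons]
      rw [pvChunks_cons _ _ _ (by simp), hBs, List.flatten_cons]
      have hhead : PySem.List.slice (h :: t) (some ((0:Int) * (B:Int))) (some ((0:Int) * (B:Int) + (B:Int)))
          = (h :: t).take B := by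
        rw [zero_mul, zero_add, PySem.List.slice_zero_start, PySem.List.slice_to_natCast]
      rw [hhead]
      congr 1
      rw [listblockGo_eq_flatMap] at ih
      simp only [List.length_drop] at ih
      rw [← ih, hra]
      set ra' := pvRa ((h :: t).length - B) (B : Int) with hra'
      rw [show ((0:Int) + 1) = 1 from by ring]
      rw [PySem.List.pyRange_one 1, PySem.List.pyRange_one 0]
      rw [show ra' + 1 - 1 = ra' from by ring, sub_zero]
      rw [List.flatMap_map, List.flatMap_map]
      congr 1
      funext k
      have h1 : (1 + (k : Int)) * (B : Int) = ((B + k * B : Nat) : Int) := by push_cast; ring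
      have h2 : (0 + (k : Int)) * (B : Int) = ((k * B : Nat) : Int) := by push_cast; ring
      rw [h1, h2, PySem.List.slice_natCast_add, PySem.List.slice_natCast_add, List.drop_drop]
lemma Bside (B : Nat) (hB1 : 1 ≤ B) (joins : List Char) (r : List String) :
    ∀ p c, c.length < B →
      pvFlush joins (r.foldl (pvStep (B : Int) joins) (p, c)) =
        p ++ pvChunks (B - 1) joins (c ++ r.map (fun i => pvFmtAlt i.toList)) := by
  have hBs : B - 1 + 1 = B := by omega
  induction r with
  | nil =>
      intro p c hc
      simp only [List.foldl_nil, List.map_nil, List.append_nil, pvFlush]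
      by_cases h : c = []
      · subst h; simp [pvChunks]
      · rw [if_pos h, pvChunks_cons _ _ _ h, hBs]
        rw [List.take_of_length_le (by omega), List.drop_eq_nil_of_le (by omega)]
        simp [pvChunks]
  | cons i r' ih =>
      intro p c hc
      simp only [List.foldl_cons]
      rw [show pvStep (B : Int) joins (p, c) i =
          (if ((c ++ [pvFmtAlt i.toList]).length : Int) = (B : Int) then
            (p ++ [PySem.Chars.join joins (c ++ [pvFmtAlt i.toList]) ++ "  \n".toList], ([] : List (List Char)))
          else (p, c ++ [pvFmtAlt i.toList])) from rfl]
      by_cases hfull : ((c ++ [pvFmtAlt i.toList]).length : Int) = (B : Int)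
      · rw [if_pos hfull]
        rw [ih _ _ (by simpa using hB1)]
        have hlen : (c ++ [pvFmtAlt i.toList]).length = B := by exact_mod_cast hfull
        rw [show c ++ (i :: r').map (fun i => pvFmtAlt i.toList)
            = (c ++ [pvFmtAlt i.toList]) ++ r'.map (fun i => pvFmtAlt i.toList) from by simp]
        conv_rhs => rw [pvChunks_cons _ _ _ (by simp), hBs, List.take_left' hlen, List.drop_left' hlen]
        simp
      · rw [if_neg hfull]
        have hlt : (c ++ [pvFmtAlt i.toList]).length < B := by
          have : (c ++ [pvFmtAlt i.toList]).length = c.length + 1 := by simp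
          have hne' : (c ++ [pvFmtAlt i.toList]).length ≠ B := fun he => hfull (by exact_mod_cast he)
          omega
        rw [ih _ _ hlt]
        simp

lemma Bneg (bl : Int) (hbl : bl < 0) (joins : List Char) (r : List String) :
    ∀ p c, r.foldl (pvStep bl joins) (p, c) = (p, c ++ r.map (fun i => pvFmtAlt i.toList)) := by
  induction r with
  | nil => intro p c; simp
  | cons i r' ih =>
      intro p c
      simp only [List.foldl_cons]
      rw [show pvStep bl joins (p, c) i =
          (if ((c ++ [pvFmtAlt i.toList]).length : Int) = bl then
            (p ++ [PySem.Chars.join joins (c ++ [pvFmtAlt i.toList]) ++ "  \n".toList], ([] : List (List Char)))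
          else (p, c ++ [pvFmtAlt i.toList])) from rfl]
      rw [if_neg (fun he => absurd (he ▸ Int.natCast_nonneg (c ++ [pvFmtAlt i.toList]).length) (by omega))]
      rw [ih]
      simp

-- ===== VERDICT (by name: the statement is the Claim_ definition above) =====
theorem listblock_spec : Claim_unchanged_listblock := by
  intro x bl joins _ hpre
  unfold Pre_listblock at hpre
  unfold Spec_listblock
  intro hnd
  unfold D_listblock at hnd
  rcases lt_trichotomy bl 0 with hneg | h0 | hpos
  · have hx : x = [] := by
      by_contra hx
      exact hnd ⟨hneg, hx⟩
    subst hx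
    simp [listblock, listblock_alt, listblockGo, pvFlush, PySem.Int.floordiv, PySem.Int.mod,
      Int.zero_fdiv, Int.zero_fmod, PySem.List.pyRange_one_eq_nil (le_refl (0:Int)),
      PySem.Chars.join_nil]
  · exact absurd h0 hpre
  · obtain ⟨B, rfl⟩ : ∃ B : Nat, bl = (B:Int) := ⟨bl.toNat, (Int.toNat_of_nonneg (by omega)).symm⟩
    have hB1 : 1 ≤ B := by exact_mod_cast hpos
    unfold listblock listblock_alt
    rw [Aside B hB1, Bside B hB1 joins.toList x [] [] (by simpa using hB1)]
    rw [pv_join_nil_eq_flatten]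
    simp [pvFmtAlt, pvFmt]

theorem listblock_changed : Claim_changed_listblock := by
  unfold Claim_changed_listblock; decide

theorem listblock_tight : Claim_exact_listblock := by
  intro x bl joins _ _ hd
  unfold D_listblock at hd
  obtain ⟨hneg, hx⟩ := hd
  have hlen : 1 ≤ (x.map (fun i => pvFmt i.toList)).length := by
    cases x with
    | nil => exact absurd rfl hx
    | cons a t => simp
  have hra : pvRa (x.map (fun i => pvFmt i.toList)).length bl ≤ 0 := by
    unfold pvRa
    dsimp only
    have hid := PySem.Int.floordiv_mul_add_mod ((x.map (fun i => pvFmt i.toList)).length : Int) bl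
    have hmb := PySem.Int.mod_neg_bounds (a := ((x.map (fun i => pvFmt i.toList)).length : Int)) hneg
    have hf : PySem.Int.floordiv ((x.map (fun i => pvFmt i.toList)).length : Int) bl < 0 := by
      by_contra h
      rw [Int.not_lt] at h
      nlinarith [hid, hmb.1, hmb.2, hlen]
    split <;> omega
  have hA : listblock x bl joins = String.ofList [] := by
    unfold listblock
    rw [listblockGo_eq_flatMap, PySem.List.pyRange_one_eq_nil hra]
    simp
  have hB : listblock_alt x bl joins =
      String.ofList (PySem.Chars.join joins.toList (x.map (fun s => pvFmtAlt s.toList)) ++ "  \n".toList) := by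
    unfold listblock_alt
    rw [Bneg bl hneg joins.toList x [] []]
    unfold pvFlush
    rw [if_pos (by cases x with | nil => exact absurd rfl hx | cons a t => simp)]
    simp [PySem.Chars.join_singleton]
  rw [hA, hB]
  intro h
  have h2 := String.ofList_inj.mp h
  have hnl : "  \n".toList = [' ', ' ', '\n'] := rfl
  rw [hnl] at h2
  simp at h2
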